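-- pv_equiv track=rewrite | github.com/greenstar1151/Baekjoon | 1202_보석 도둑/1202_보석 도둑_260426.py | solution
-- ===== SOURCE A (Python) =====
-- import heapq
--
-- def solution(jewels: list[tuple[int, int]], bag_capacities: list[int]):
--     jewels.sort()
--     bag_capacities.sort()
--
--     available_values: list[int] = []
--     jewel_idx = 0
--     stolen_value_sum = 0
--     for capacity in bag_capacities:
--         while jewel_idx < len(jewels) and jewels[jewel_idx][0] <= capacity:
--             _, value = jewels[jewel_idx]
--             heapq.heappush(available_values, -value)
--             jewel_idx += 1
--
--         if available_values:
--             stolen_value_sum -= heapq.heappop(available_values)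
--
--     return stolen_value_sum
-- ===== SOURCE B (Python) =====
-- def solution(jewels: list[tuple[int, int]], bag_capacities: list[int]):
--     jewels.sort()
--     bag_capacities.sort()
--
--     # jewel-major greedy: walk jewels by descending value; each bag takes
--     # the most valuable jewel it can hold, scanning the value-ordered list.
--     remaining = sorted(jewels, key=lambda j: -j[1])
--     total = 0
--     for capacity in bag_capacities:
--         for i, (weight, value) in enumerate(remaining):
--             if weight <= capacity:
--                 total += value
--                 del remaining[i]
--                 break
--     return total
-- ===== Notes on version B (the rewrite author's own statement) =====
-- stated objective: alternative
-- what changed: Replaces the bag-major two-pointer + binary max-heap greedy by a jewel-list greedy: jewels are kept in one value-descending list and each bag (ascending) removes the first jewel it can hold, so the heap and the push pointer disappear.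
import Mathlib
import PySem

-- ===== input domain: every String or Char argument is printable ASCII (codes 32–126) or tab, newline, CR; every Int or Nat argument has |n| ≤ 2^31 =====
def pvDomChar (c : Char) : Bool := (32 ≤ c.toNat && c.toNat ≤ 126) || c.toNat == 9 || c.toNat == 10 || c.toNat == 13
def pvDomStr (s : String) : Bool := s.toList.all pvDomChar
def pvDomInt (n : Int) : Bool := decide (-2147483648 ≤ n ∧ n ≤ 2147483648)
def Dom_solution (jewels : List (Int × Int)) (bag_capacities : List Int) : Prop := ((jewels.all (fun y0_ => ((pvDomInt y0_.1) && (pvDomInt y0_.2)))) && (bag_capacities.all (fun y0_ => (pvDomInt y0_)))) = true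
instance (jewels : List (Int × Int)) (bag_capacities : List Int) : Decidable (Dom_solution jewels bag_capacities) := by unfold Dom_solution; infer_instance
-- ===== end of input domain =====

-- B replaces A's bag-major two-pointer + binary max-heap greedy by a jewel-list greedy
-- (one value-descending list; each bag removes the first jewel it can hold): an
-- alternative decomposition, not claimed faster.  Both Pythons sort their two list
-- arguments in place; the equivalence proved here is about the return value.

-- ===== PORT A =====
-- hand port of heapq._siftdown's while loop (bubble the new item up); no PySem primitive for heapq
def pySiftdownLoop (heap : List Int) (startpos pos : Nat) (newitem : Int) : List Int × Nat :=
  if _h : startpos < pos then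
    if newitem < heap.getD ((pos - 1) / 2) 0 then
      pySiftdownLoop (heap.set pos (heap.getD ((pos - 1) / 2) 0)) startpos ((pos - 1) / 2) newitem
    else (heap, pos)
  else (heap, pos)
  termination_by pos
  decreasing_by omega

-- heapq._siftdown: run the loop, then heap[pos] = newitem
def pySiftdown (heap : List Int) (startpos pos : Nat) : List Int :=
  let newitem := heap.getD pos 0
  let r := pySiftdownLoop heap startpos pos newitem
  r.1.set r.2 newitem

-- heapq.heappush: append then _siftdown(heap, 0, len(heap)-1)
def pyHeappush (heap : List Int) (item : Int) : List Int :=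
  pySiftdown (heap ++ [item]) 0 heap.length

-- heapq._siftup's childpos selection: the smaller child of pos
def pyMinChild (heap : List Int) (pos : Nat) : Nat :=
  if 2 * pos + 2 < heap.length ∧ ¬ heap.getD (2 * pos + 1) 0 < heap.getD (2 * pos + 2) 0
  then 2 * pos + 2 else 2 * pos + 1

-- hand port of heapq._siftup's while loop (move the smaller child up, descend to a leaf)
def pySiftupLoop (heap : List Int) (pos : Nat) : List Int × Nat :=
  if _h : 2 * pos + 1 < heap.length then
    pySiftupLoop (heap.set pos (heap.getD (pyMinChild heap pos) 0)) (pyMinChild heap pos)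
  else (heap, pos)
  termination_by heap.length - pos
  decreasing_by simp only [List.length_set]; unfold pyMinChild; split_ifs <;> omega

-- heapq._siftup: descend to a leaf, place newitem there, then _siftdown back up
def pySiftup (heap : List Int) (pos : Nat) : List Int :=
  let newitem := heap.getD pos 0
  let r := pySiftupLoop heap pos
  pySiftdown (r.1.set r.2 newitem) pos r.2

-- heapq.heappop (A only calls it on a nonempty heap; [] would raise IndexError)
def pyHeappop (heap : List Int) : Int × List Int :=
  match heap.getLast? with
  | none => (0, [])
  | some lastelt =>
    let rest := heap.dropLast
    if rest.isEmpty then (lastelt, rest)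
    else (rest.getD 0 0, pySiftup (rest.set 0 lastelt) 0)

-- the inner while: push jewels while jewels[jewel_idx][0] <= capacity
def pushAll (js : List (Int × Int)) (c : Int) (k : Nat) (heap : List Int) : List Int × Nat :=
  if h : k < js.length then
    if (js[k]).1 ≤ c then pushAll js c (k + 1) (pyHeappush heap (-(js[k]).2))
    else (heap, k)
  else (heap, k)
  termination_by js.length - k
  decreasing_by omega

-- one iteration of A's for-loop over bag_capacities; state = (heap, jewel_idx, sum)
def bagStep (js : List (Int × Int)) (st : List Int × Nat × Int) (c : Int) : List Int × Nat × Int :=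
  let p := pushAll js c st.2.1 st.1
  if p.1.isEmpty then (p.1, p.2, st.2.2)
  else
    let q := pyHeappop p.1
    (q.2, p.2, st.2.2 - q.1)

def solution (jewels : List (Int × Int)) (bag_capacities : List Int) : Int :=
  let js := PySem.List.sorted2 jewels (fun j => j.1) (fun j => j.2) false
  let bs := PySem.List.sorted bag_capacities (fun x => x) false
  (bs.foldl (bagStep js) ([], 0, 0)).2.2

-- ===== PORT B =====
-- Source B's inner loop: first remaining jewel (value-descending order) that fits, and the list without it
def findFit (rem : List (Int × Int)) (c : Int) : Option ((Int × Int) × List (Int × Int)) :=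
  match rem with
  | [] => none
  | j :: rest =>
    if j.1 ≤ c then some (j, rest)
    else (findFit rest c).map (fun p => (p.1, j :: p.2))

def altStep (st : List (Int × Int) × Int) (c : Int) : List (Int × Int) × Int :=
  match findFit st.1 c with
  | some p => (p.2, st.2 + p.1.2)
  | none => st

def solution_alt (jewels : List (Int × Int)) (bag_capacities : List Int) : Int :=
  let js := PySem.List.sorted2 jewels (fun j => j.1) (fun j => j.2) false
  let bs := PySem.List.sorted bag_capacities (fun x => x) false
  let rem := PySem.List.sorted js (fun j => -j.2) false
  (bs.foldl altStep (rem, 0)).2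

-- ===== PRECONDITION & SPEC =====
def Spec_solution (jewels : List (Int × Int)) (bag_capacities : List Int) (out : Int) : Prop := out = solution_alt jewels bag_capacities
instance (jewels : List (Int × Int)) (bag_capacities : List Int) (out : Int) : Decidable (Spec_solution jewels bag_capacities out) := by unfold Spec_solution; infer_instance

-- ===== CLAIM (what is proved, stated in full; the proofs are below) =====
def Claim_equal_solution : Prop := ∀ (jewels : List (Int × Int)) (bag_capacities : List Int), Dom_solution jewels bag_capacities → Spec_solution jewels bag_capacities (solution jewels bag_capacities)

-- ===== LEMMAS AND PROOFS =====


-- ---- small getD/set/multiset helpers ----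
theorem getD_set_ne (l : List Int) (i j : Nat) (v : Int) (h : j ≠ i) :
    (l.set i v).getD j 0 = l.getD j 0 := by
  simp [List.getD_eq_getElem?_getD, List.getElem?_set_ne (Ne.symm h)]

theorem getD_set_self (l : List Int) (i : Nat) (v : Int) (h : i < l.length) :
    (l.set i v).getD i 0 = v := by
  simp [List.getD_eq_getElem?_getD, h]

theorem msSet : ∀ (l : List Int) (i : Nat) (v : Int), i < l.length →
    (l.getD i 0) ::ₘ ((l.set i v : List Int) : Multiset Int) = v ::ₘ (l : Multiset Int) := by
  intro l
  induction l with
  | nil => intro i v h; simp at h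
  | cons a tl ih =>
    intro i v h
    cases i with
    | zero => simpa using Multiset.cons_swap a v (tl : Multiset Int)
    | succ n =>
      have hn : n < tl.length := by simpa using h
      have := ih n v hn
      simp only [List.set, List.getD_cons_succ, ← Multiset.cons_coe]
      rw [Multiset.cons_swap, this, Multiset.cons_swap]

theorem msSetSwap (l : List Int) (p q : Nat) (x : Int) (hp : p < l.length) (hq : q < l.length)
    (hpq : p ≠ q) :
    (((l.set p (l.getD q 0)).set q x : List Int) : Multiset Int)
      = ((l.set p x : List Int) : Multiset Int) := by
  have h1 := msSet (l.set p (l.getD q 0)) q x (by simpa using hq)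
  rw [getD_set_ne l p q _ (Ne.symm hpq)] at h1
  have h2 := msSet l p (l.getD q 0) hp
  have h3 := msSet l p x hp
  have key : l.getD p 0 ::ₘ l.getD q 0 ::ₘ (((l.set p (l.getD q 0)).set q x : List Int) : Multiset Int)
      = l.getD p 0 ::ₘ l.getD q 0 ::ₘ ((l.set p x : List Int) : Multiset Int) := by
    calc l.getD p 0 ::ₘ l.getD q 0 ::ₘ (((l.set p (l.getD q 0)).set q x : List Int) : Multiset Int)
        = l.getD p 0 ::ₘ (x ::ₘ ((l.set p (l.getD q 0) : List Int) : Multiset Int)) := by rw [h1]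
      _ = x ::ₘ (l.getD p 0 ::ₘ ((l.set p (l.getD q 0) : List Int) : Multiset Int)) :=
          Multiset.cons_swap _ _ _
      _ = x ::ₘ (l.getD q 0 ::ₘ (l : Multiset Int)) := by rw [h2]
      _ = l.getD q 0 ::ₘ (x ::ₘ (l : Multiset Int)) := Multiset.cons_swap _ _ _
      _ = l.getD q 0 ::ₘ (l.getD p 0 ::ₘ ((l.set p x : List Int) : Multiset Int)) := by rw [h3]
      _ = l.getD p 0 ::ₘ l.getD q 0 ::ₘ ((l.set p x : List Int) : Multiset Int) :=
          Multiset.cons_swap _ _ _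
  exact (Multiset.cons_inj_right _).mp ((Multiset.cons_inj_right _).mp key)

-- ---- heap invariants ----
def heapInv (l : List Int) : Prop :=
  ∀ j : Nat, 0 < j → j < l.length → l.getD ((j - 1) / 2) 0 ≤ l.getD j 0

def heapExcept (l : List Int) (p : Nat) : Prop :=
  ∀ j : Nat, 0 < j → j < l.length → j ≠ p → (j - 1) / 2 ≠ p → l.getD ((j - 1) / 2) 0 ≤ l.getD j 0

theorem heap_root_le (l : List Int) (h : heapInv l) :
    ∀ j, j < l.length → l.getD 0 0 ≤ l.getD j 0 := by
  intro j
  induction j using Nat.strong_induction_on with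
  | _ j ih =>
    intro hj
    rcases Nat.eq_zero_or_pos j with rfl | hpos
    · exact le_refl _
    · exact le_trans (ih ((j - 1) / 2) (by omega) (by omega)) (h j hpos hj)

theorem root_le_mem (l : List Int) (h : heapInv l) : ∀ z ∈ l, l.getD 0 0 ≤ z := by
  intro z hz
  obtain ⟨i, hi, rfl⟩ := List.mem_iff_getElem.mp hz
  have := heap_root_le l h i hi
  rwa [List.getD_eq_getElem l 0 hi] at this

theorem siftdownLoop_spec :
    ∀ (pos : Nat) (l : List Int) (x : Int),
      pos < l.length →
      heapExcept l pos →
      (∀ c : Nat, (c = 2 * pos + 1 ∨ c = 2 * pos + 2) → c < l.length → x ≤ l.getD c 0) →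
      (0 < pos → ∀ c : Nat, (c = 2 * pos + 1 ∨ c = 2 * pos + 2) → c < l.length →
        l.getD ((pos - 1) / 2) 0 ≤ l.getD c 0) →
      (pySiftdownLoop l 0 pos x).1.length = l.length ∧
      (pySiftdownLoop l 0 pos x).2 < l.length ∧
      heapInv ((pySiftdownLoop l 0 pos x).1.set (pySiftdownLoop l 0 pos x).2 x) ∧
      (((pySiftdownLoop l 0 pos x).1.set (pySiftdownLoop l 0 pos x).2 x : List Int) : Multiset Int)
        = ((l.set pos x : List Int) : Multiset Int) := by
  intro pos
  induction pos using Nat.strong_induction_on with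
  | _ pos ih =>
    intro l x hpos hE hchild hbridge
    rw [pySiftdownLoop]
    by_cases h0 : 0 < pos
    · rw [dif_pos h0]
      by_cases hlt : x < l.getD ((pos - 1) / 2) 0
      · rw [if_pos hlt]
        set pp := (pos - 1) / 2 with hpp
        have hpplt : pp < pos := by omega
        have hpplen : pp < l.length := by omega
        set l' := l.set pos (l.getD pp 0) with hl'
        have hlen' : l'.length = l.length := by simp [hl']
        have hE' : heapExcept l' pp := by
          intro j hj hjl hjne hpne
          rw [hlen'] at hjl
          by_cases hjpos : j = pos
          · exact absurd (by omega : (j - 1) / 2 = pp) hpne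
          · rw [getD_set_ne l pos j _ hjpos]
            by_cases hpar : (j - 1) / 2 = pos
            · rw [hpar, getD_set_self l pos _ hpos]
              exact hbridge h0 j (by omega) hjl
            · rw [getD_set_ne l pos _ _ hpar]
              exact hE j hj hjl hjpos hpar
        have hchild' : ∀ c : Nat, (c = 2 * pp + 1 ∨ c = 2 * pp + 2) → c < l'.length →
            x ≤ l'.getD c 0 := by
          intro c hc hcl
          rw [hlen'] at hcl
          by_cases hcpos : c = pos
          · rw [hcpos, getD_set_self l pos _ hpos]
            exact le_of_lt hlt
          · rw [getD_set_ne l pos c _ hcpos]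
            have hcp : (c - 1) / 2 = pp := by omega
            have : l.getD pp 0 ≤ l.getD c 0 := by
              have := hE c (by omega) hcl hcpos (by rw [hcp]; omega)
              rwa [hcp] at this
            exact le_trans (le_of_lt hlt) this
        have hbridge' : 0 < pp → ∀ c : Nat, (c = 2 * pp + 1 ∨ c = 2 * pp + 2) → c < l'.length →
            l'.getD ((pp - 1) / 2) 0 ≤ l'.getD c 0 := by
          intro hpp0 c hc hcl
          rw [hlen'] at hcl
          have hgp : (pp - 1) / 2 ≠ pos := by omega
          rw [getD_set_ne l pos _ _ hgp]
          have hEpp : l.getD ((pp - 1) / 2) 0 ≤ l.getD pp 0 :=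
            hE pp hpp0 hpplen (by omega) (by omega)
          by_cases hcpos : c = pos
          · rw [hcpos, getD_set_self l pos _ hpos]
            exact hEpp
          · rw [getD_set_ne l pos c _ hcpos]
            have hcp : (c - 1) / 2 = pp := by omega
            have h2 := hE c (by omega) hcl hcpos (by rw [hcp]; omega)
            rw [hcp] at h2
            exact le_trans hEpp h2
        obtain ⟨ha, hb, hc2, hd⟩ := ih pp hpplt l' x (by omega) hE' hchild' hbridge'
        refine ⟨by rw [ha, hlen'], by rw [← hlen']; omega, hc2, ?_⟩
        rw [hd, hl']
        exact msSetSwap l pos pp x hpos hpplen (by omega)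
      · rw [if_neg hlt]
        refine ⟨rfl, hpos, ?_, rfl⟩
        intro j hj hjl
        simp only [List.length_set] at hjl
        by_cases hjpos : j = pos
        · subst hjpos
          rw [getD_set_self l j x hjl, getD_set_ne l j _ _ (by omega)]
          exact le_of_not_gt hlt
        · rw [getD_set_ne l pos j _ hjpos]
          by_cases hpar : (j - 1) / 2 = pos
          · rw [hpar, getD_set_self l pos x hpos]
            exact hchild j (by omega) hjl
          · rw [getD_set_ne l pos _ _ hpar]
            exact hE j hj hjl hjpos hpar
    · rw [dif_neg h0]
      have hpos0 : pos = 0 := by omega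
      refine ⟨rfl, hpos, ?_, rfl⟩
      intro j hj hjl
      simp only [List.length_set] at hjl
      subst hpos0
      have hjne : j ≠ 0 := by omega
      rw [getD_set_ne l 0 j x hjne]
      by_cases hpar : (j - 1) / 2 = 0
      · rw [hpar, getD_set_self l 0 x hpos]
        exact hchild j (by omega) hjl
      · rw [getD_set_ne l 0 _ x hpar]
        exact hE j hj hjl hjne hpar

theorem siftdown_spec (l : List Int) (pos : Nat) (hpos : pos < l.length) (hE : heapExcept l pos)
    (hchild : ∀ c : Nat, (c = 2 * pos + 1 ∨ c = 2 * pos + 2) → c < l.length →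
      l.getD pos 0 ≤ l.getD c 0)
    (hbridge : 0 < pos → ∀ c : Nat, (c = 2 * pos + 1 ∨ c = 2 * pos + 2) → c < l.length →
      l.getD ((pos - 1) / 2) 0 ≤ l.getD c 0) :
    (pySiftdown l 0 pos).length = l.length ∧ heapInv (pySiftdown l 0 pos) ∧
      ((pySiftdown l 0 pos : List Int) : Multiset Int) = (l : Multiset Int) := by
  obtain ⟨h1, h2, h3, h4⟩ := siftdownLoop_spec pos l (l.getD pos 0) hpos hE hchild hbridge
  have e : pySiftdown l 0 pos
      = (pySiftdownLoop l 0 pos (l.getD pos 0)).1.set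
          (pySiftdownLoop l 0 pos (l.getD pos 0)).2 (l.getD pos 0) := rfl
  rw [e]
  refine ⟨by rw [List.length_set]; exact h1, h3, ?_⟩
  have hcancel := msSet l pos (l.getD pos 0) hpos
  exact (Multiset.cons_inj_right _).mp (by rw [h4]; exact hcancel)

theorem heappush_spec (heap : List Int) (x : Int) (h : heapInv heap) :
    heapInv (pyHeappush heap x) ∧
      ((pyHeappush heap x : List Int) : Multiset Int) = x ::ₘ (heap : Multiset Int) := by
  have e : pyHeappush heap x = pySiftdown (heap ++ [x]) 0 heap.length := rfl
  have hlen : (heap ++ [x]).length = heap.length + 1 := by simp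
  have hpos : heap.length < (heap ++ [x]).length := by simp
  have hE : heapExcept (heap ++ [x]) heap.length := by
    intro j hj hjl hjne hpne
    rw [hlen] at hjl
    have hjheap : j < heap.length := by omega
    rw [List.getD_append _ _ 0 _ hjheap, List.getD_append _ _ 0 _ (by omega : (j-1)/2 < heap.length)]
    exact h j hj hjheap
  have hchild : ∀ c : Nat, (c = 2 * heap.length + 1 ∨ c = 2 * heap.length + 2) →
      c < (heap ++ [x]).length → (heap ++ [x]).getD heap.length 0 ≤ (heap ++ [x]).getD c 0 := by
    intro c hc hcl
    rw [hlen] at hcl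
    omega
  have hbridge : 0 < heap.length → ∀ c : Nat,
      (c = 2 * heap.length + 1 ∨ c = 2 * heap.length + 2) → c < (heap ++ [x]).length →
      (heap ++ [x]).getD ((heap.length - 1) / 2) 0 ≤ (heap ++ [x]).getD c 0 := by
    intro _ c hc hcl
    rw [hlen] at hcl
    omega
  obtain ⟨h1, h2, h3⟩ := siftdown_spec (heap ++ [x]) heap.length hpos hE hchild hbridge
  rw [e]
  refine ⟨h2, ?_⟩
  rw [h3]
  exact Multiset.coe_eq_coe.mpr (List.perm_append_singleton x heap)

theorem siftupLoop_spec :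
    ∀ (d : Nat) (l : List Int) (pos : Nat), l.length - pos = d →
      pos < l.length → heapExcept l pos →
      (0 < pos → ∀ c : Nat, (c = 2 * pos + 1 ∨ c = 2 * pos + 2) → c < l.length →
        l.getD ((pos - 1) / 2) 0 ≤ l.getD c 0) →
      (pySiftupLoop l pos).1.length = l.length ∧
      (pySiftupLoop l pos).2 < l.length ∧
      ¬ (2 * (pySiftupLoop l pos).2 + 1 < l.length) ∧
      heapExcept (pySiftupLoop l pos).1 (pySiftupLoop l pos).2 ∧
      ∀ x : Int, (((pySiftupLoop l pos).1.set (pySiftupLoop l pos).2 x : List Int) : Multiset Int)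
        = ((l.set pos x : List Int) : Multiset Int) := by
  intro d
  induction d using Nat.strong_induction_on with
  | _ d ih =>
    intro l pos hd hpos hE hbridge
    rw [pySiftupLoop]
    by_cases h : 2 * pos + 1 < l.length
    · rw [dif_pos h]
      set cp := pyMinChild l pos with hcpdef
      have hcp_cases : cp = 2 * pos + 1 ∨ cp = 2 * pos + 2 := by
        rw [hcpdef]; unfold pyMinChild; split_ifs <;> simp
      have hcp_lt : cp < l.length := by
        rw [hcpdef]; unfold pyMinChild; split_ifs with hco
        · exact hco.1
        · exact h
      have hcp_gt : pos < cp := by omega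
      have hcp_min : ∀ c : Nat, (c = 2 * pos + 1 ∨ c = 2 * pos + 2) → c < l.length →
          l.getD cp 0 ≤ l.getD c 0 := by
        intro c hc hcl
        rw [hcpdef]; unfold pyMinChild; split_ifs with hco
        · rcases hc with rfl | rfl
          · exact le_of_not_gt hco.2
          · exact le_refl _
        · push_neg at hco
          rcases hc with rfl | rfl
          · exact le_refl _
          · exact le_of_lt (hco hcl)
      set l' := l.set pos (l.getD cp 0) with hl'
      have hlen' : l'.length = l.length := by simp [hl']
      have hE' : heapExcept l' cp := by
        intro j hj hjl hjne hpne
        rw [hlen'] at hjl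
        by_cases hjpos : j = pos
        · subst hjpos
          rw [getD_set_self l j _ hpos, getD_set_ne l j _ _ (by omega)]
          exact hbridge hj cp hcp_cases hcp_lt
        · rw [getD_set_ne l pos j _ hjpos]
          by_cases hpar : (j - 1) / 2 = pos
          · rw [hpar, getD_set_self l pos _ hpos]
            exact hcp_min j (by omega) hjl
          · rw [getD_set_ne l pos _ _ hpar]
            exact hE j hj hjl hjpos hpar
      have hbridge' : 0 < cp → ∀ c : Nat, (c = 2 * cp + 1 ∨ c = 2 * cp + 2) → c < l'.length →
          l'.getD ((cp - 1) / 2) 0 ≤ l'.getD c 0 := by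
        intro _ c hc hcl
        rw [hlen'] at hcl
        have hpar : (cp - 1) / 2 = pos := by omega
        rw [hpar, getD_set_self l pos _ hpos, getD_set_ne l pos c _ (by omega)]
        have hcpar : (c - 1) / 2 = cp := by omega
        have h2 := hE c (by omega) hcl (by omega) (by rw [hcpar]; omega)
        rwa [hcpar] at h2
      obtain ⟨h1, h2, h3, h4, h5⟩ := ih (l.length - cp) (by omega) l' cp (by omega) (by omega) hE' hbridge'
      rw [hlen'] at h1 h2 h3
      refine ⟨h1, h2, h3, h4, ?_⟩
      intro x
      rw [h5 x, hl']
      exact msSetSwap l pos cp x hpos hcp_lt (by omega)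
    · rw [dif_neg h]
      exact ⟨rfl, hpos, h, hE, fun _ => rfl⟩

theorem siftup_spec (l : List Int) (hne : 0 < l.length) (hE : heapExcept l 0) :
    heapInv (pySiftup l 0) ∧ ((pySiftup l 0 : List Int) : Multiset Int) = (l : Multiset Int) := by
  obtain ⟨h1, h2, h3, h4, h5⟩ := siftupLoop_spec l.length l 0 (by omega) hne hE (by omega)
  set x0 := l.getD 0 0 with hx0
  set r1 := (pySiftupLoop l 0).1 with hr1
  set r2 := (pySiftupLoop l 0).2 with hr2
  have e : pySiftup l 0 = pySiftdown (r1.set r2 x0) 0 r2 := rfl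
  set l2 := r1.set r2 x0 with hl2
  have hlen2 : l2.length = l.length := by simp [hl2, h1]
  have hpos2 : r2 < l2.length := by rw [hlen2]; exact h2
  have hE2 : heapExcept l2 r2 := by
    intro j hj hjl hjne hpne
    rw [hl2, getD_set_ne r1 r2 j _ hjne, getD_set_ne r1 r2 _ _ hpne]
    rw [hlen2] at hjl
    exact h4 j hj (by rw [h1]; exact hjl) hjne hpne
  have hchild2 : ∀ c : Nat, (c = 2 * r2 + 1 ∨ c = 2 * r2 + 2) → c < l2.length →
      l2.getD r2 0 ≤ l2.getD c 0 := by
    intro c hc hcl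
    rw [hlen2] at hcl
    omega
  have hbridge2 : 0 < r2 → ∀ c : Nat, (c = 2 * r2 + 1 ∨ c = 2 * r2 + 2) → c < l2.length →
      l2.getD ((r2 - 1) / 2) 0 ≤ l2.getD c 0 := by
    intro _ c hc hcl
    rw [hlen2] at hcl
    omega
  obtain ⟨g1, g2, g3⟩ := siftdown_spec l2 r2 hpos2 hE2 hchild2 hbridge2
  rw [e]
  refine ⟨g2, ?_⟩
  rw [g3, hl2, h5 x0]
  have hcancel := msSet l 0 x0 hne
  exact (Multiset.cons_inj_right _).mp hcancel

theorem heappop_spec (heap : List Int) (hne : heap ≠ []) (hI : heapInv heap) :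
    (pyHeappop heap).1 ::ₘ ((pyHeappop heap).2 : Multiset Int) = (heap : Multiset Int) ∧
      heapInv (pyHeappop heap).2 ∧ ∀ z ∈ heap, (pyHeappop heap).1 ≤ z := by
  cases hL : heap.getLast? with
  | none => exact absurd (List.getLast?_eq_none_iff.mp hL) hne
  | some a =>
    obtain ⟨rest', rfl⟩ := List.getLast?_eq_some_iff.mp hL
    have e0 : (rest' ++ [a]).dropLast = rest' := by simp
    by_cases hre : rest' = []
    · subst hre
      have e : pyHeappop ([] ++ [a]) = (a, []) := by
        simp [pyHeappop]
      rw [e]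
      refine ⟨by simp, by intro j hj hjl; simp at hjl, ?_⟩
      intro z hz
      simp at hz
      simp [hz]
    · have hrl : 0 < rest'.length := List.length_pos_iff.mpr hre
      have e : pyHeappop (rest' ++ [a]) = (rest'.getD 0 0, pySiftup (rest'.set 0 a) 0) := by
        simp [pyHeappop, List.getLast?_concat, e0, List.isEmpty_iff, hre]
      rw [e]
      have hlena : (rest' ++ [a]).length = rest'.length + 1 := by simp
      have hgd : ∀ j < rest'.length, (rest' ++ [a]).getD j 0 = rest'.getD j 0 := by
        intro j hj
        exact List.getD_append _ _ 0 j hj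
      have hE0 : heapExcept (rest'.set 0 a) 0 := by
        intro j hj hjl hjne hpne
        simp only [List.length_set] at hjl
        rw [getD_set_ne rest' 0 j _ hjne, getD_set_ne rest' 0 _ _ hpne]
        have := hI j hj (by rw [hlena]; omega)
        rwa [hgd j hjl, hgd _ (by omega)] at this
      obtain ⟨g1, g2⟩ := siftup_spec (rest'.set 0 a) (by simp [hrl]) hE0
      refine ⟨?_, g1, ?_⟩
      · rw [g2]
        have := msSet rest' 0 a hrl
        calc rest'.getD 0 0 ::ₘ ((rest'.set 0 a : List Int) : Multiset Int)
            = a ::ₘ (rest' : Multiset Int) := this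
          _ = ((rest' ++ [a] : List Int) : Multiset Int) :=
              Multiset.coe_eq_coe.mpr (List.perm_append_singleton a rest').symm
      · intro z hz
        have := root_le_mem (rest' ++ [a]) hI z hz
        rwa [hgd 0 hrl] at this

theorem pushAll_spec (js : List (Int × Int)) (c : Int) :
    ∀ (d k : Nat) (heap : List Int), js.length - k = d → k ≤ js.length → heapInv heap →
      k ≤ (pushAll js c k heap).2 ∧ (pushAll js c k heap).2 ≤ js.length ∧
      heapInv (pushAll js c k heap).1 ∧
      ((pushAll js c k heap).1 : Multiset Int)
        = (heap : Multiset Int)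
          + (((js.drop k).takeWhile (fun j => decide (j.1 ≤ c))).map (fun j => -j.2) : Multiset Int) ∧
      js.drop (pushAll js c k heap).2 = (js.drop k).dropWhile (fun j => decide (j.1 ≤ c)) := by
  intro d
  induction d using Nat.strong_induction_on with
  | _ d ih =>
    intro k heap hd hk hI
    rw [pushAll]
    by_cases h : k < js.length
    · rw [dif_pos h]
      by_cases hc : (js[k]).1 ≤ c
      · rw [if_pos hc]
        obtain ⟨hpI, hpms⟩ := heappush_spec heap (-(js[k]).2) hI
        obtain ⟨a1, a2, a3, a4, a5⟩ := ih (js.length - (k + 1)) (by omega) (k + 1) _ rfl (by omega) hpI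
        have hdk : js.drop k = js[k] :: js.drop (k + 1) := List.drop_eq_getElem_cons h
        refine ⟨by omega, a2, a3, ?_, ?_⟩
        · rw [a4, hpms, hdk, List.takeWhile_cons, if_pos (by simp [hc]), List.map_cons,
            ← Multiset.cons_coe]
          simp [Multiset.cons_add, Multiset.add_cons]
          exact List.perm_middle.symm
        · rw [a5, hdk, List.dropWhile_cons, if_pos (by simp [hc])]
      · rw [if_neg hc]
        have hdk : js.drop k = js[k] :: js.drop (k + 1) := List.drop_eq_getElem_cons h
        refine ⟨le_refl _, by omega, hI, ?_, ?_⟩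
        · rw [hdk, List.takeWhile_cons, if_neg (by simp [hc])]
          simp
        · conv_rhs => rw [hdk, List.dropWhile_cons]
          rw [if_neg (by simp [hc])]
          exact hdk
    · rw [dif_neg h]
      have hnil : js.drop k = [] := List.drop_eq_nil_of_le (by omega)
      refine ⟨le_refl _, hk, hI, by simp [hnil], by simp [hnil]⟩

theorem tw_filter (c : Int) :
    ∀ l : List (Int × Int), l.Pairwise (fun a b => a.1 ≤ b.1) →
      l.takeWhile (fun j => decide (j.1 ≤ c)) = l.filter (fun j => decide (j.1 ≤ c)) ∧
      l.dropWhile (fun j => decide (j.1 ≤ c)) = l.filter (fun j => !decide (j.1 ≤ c)) := by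
  intro l
  induction l with
  | nil => simp
  | cons a tl ih =>
    intro hp
    rcases List.pairwise_cons.mp hp with ⟨ha, htl⟩
    by_cases hc : a.1 ≤ c
    · simp only [List.takeWhile_cons, List.dropWhile_cons, List.filter_cons, hc, decide_true,
        Bool.not_true, if_true]
      rcases ih htl with ⟨h1, h2⟩
      simp [h1, h2]
    · have hall : ∀ y ∈ (a :: tl), ¬ y.1 ≤ c := by
        intro y hy
        rcases List.mem_cons.mp hy with rfl | hy
        · exact hc
        · exact fun hyc => hc (le_trans (ha y hy) hyc)
      have e1 : (a :: tl).takeWhile (fun j => decide (j.1 ≤ c)) = [] := by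
        simp [List.takeWhile_cons, hc]
      have e2 : (a :: tl).dropWhile (fun j => decide (j.1 ≤ c)) = a :: tl := by
        simp [List.dropWhile_cons, hc]
      have e3 : (a :: tl).filter (fun j => decide (j.1 ≤ c)) = [] := by
        rw [List.filter_eq_nil_iff]
        intro y hy
        simp [hall y hy]
      have e4 : (a :: tl).filter (fun j => !decide (j.1 ≤ c)) = a :: tl := by
        rw [List.filter_eq_self]
        intro y hy
        simp [hall y hy]
      rw [e1, e2, e3, e4]
      exact ⟨rfl, rfl⟩

theorem ms_filter_split {α : Type} (p q : α → Bool) (himp : ∀ a, p a = true → q a = true) :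
    ∀ l : List α, ((l.filter q : List α) : Multiset α)
      = (l.filter p : Multiset α) + ((l.filter (fun a => !p a)).filter q : Multiset α) := by
  intro l
  induction l with
  | nil => simp
  | cons a tl ih =>
    by_cases hp : p a
    · have hq := himp a hp
      simp [List.filter_cons, hp, hq, ← Multiset.cons_coe, Multiset.cons_add, ih]
    · by_cases hq : q a
      · simp [List.filter_cons, hp, hq, ← Multiset.cons_coe, ih, Multiset.add_cons]
      · simp [List.filter_cons, hp, hq, ih]

theorem findFit_eq_none_iff (rem : List (Int × Int)) (c : Int) :
    findFit rem c = none ↔ ∀ j ∈ rem, ¬ j.1 ≤ c := by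
  induction rem with
  | nil => simp [findFit]
  | cons a tl ih =>
    by_cases hc : a.1 ≤ c
    · simp [findFit, hc]
    · simp only [findFit, hc, if_false, Option.map_eq_none_iff, ih]
      constructor
      · intro h j hj
        rcases List.mem_cons.mp hj with rfl | hj
        · exact hc
        · exact h j hj
      · intro h j hj
        exact h j (List.mem_cons_of_mem a hj)

theorem findFit_eq_some (rem : List (Int × Int)) (c : Int) (j : Int × Int)
    (r : List (Int × Int)) (h : findFit rem c = some (j, r)) :
    ∃ pre post, rem = pre ++ j :: post ∧ r = pre ++ post ∧
      (∀ y ∈ pre, ¬ y.1 ≤ c) ∧ j.1 ≤ c := by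
  induction rem generalizing r with
  | nil => simp [findFit] at h
  | cons a tl ih =>
    by_cases hc : a.1 ≤ c
    · simp only [findFit, hc, if_true, Option.some.injEq, Prod.mk.injEq] at h
      exact ⟨[], tl, by simp [h.1.symm], by simp [h.2.symm], by simp, h.1 ▸ hc⟩
    · simp only [findFit, hc, if_false, Option.map_eq_some_iff] at h
      obtain ⟨⟨j', r'⟩, hfind, heq⟩ := h
      simp only [Prod.mk.injEq] at heq
      obtain ⟨rfl, rfl⟩ := heq
      obtain ⟨pre, post, h1, h2, h3, h4⟩ := ih r' hfind
      exact ⟨a :: pre, post, by simp [h1], by simp [h2], by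
        intro y hy
        rcases List.mem_cons.mp hy with rfl | hy
        · exact hc
        · exact h3 y hy, h4⟩

theorem insertBy_pairwise {α : Type} (before : α → α → Bool)
    (hasym : ∀ a b, before a b = true → before b a = false)
    (htrans : ∀ a b c, before a b = true → before b c = true → before a c = true) (x : α) :
    ∀ ys : List α, ys.Pairwise (fun a b => before b a = false) →
      (PySem.List.insertBy before x ys).Pairwise (fun a b => before b a = false) := by
  intro ys
  induction ys with
  | nil => intro _; simp [PySem.List.insertBy]
  | cons y ys ih =>
    intro hp
    rcases List.pairwise_cons.mp hp with ⟨hy, hys⟩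
    show (if before x y = true then x :: y :: ys else y :: PySem.List.insertBy before x ys).Pairwise _
    by_cases hxy : before x y = true
    · rw [if_pos hxy]
      refine List.pairwise_cons.mpr ⟨?_, hp⟩
      intro a ha
      rcases List.mem_cons.mp ha with rfl | ha
      · exact hasym x a hxy
      · by_contra hax
        have hax' : before a x = true := by
          cases h : before a x
          · exact absurd h hax
          · rfl
        have : before a y = true := htrans a x y hax' hxy
        rw [hy a ha] at this
        exact Bool.false_ne_true this
    · rw [if_neg hxy]
      refine List.pairwise_cons.mpr ⟨?_, ih hys⟩
      intro a ha
      rcases (PySem.List.mem_insertBy _ _ _ _).mp ha with rfl | ha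
      · cases h : before a y
        · rfl
        · exact absurd h hxy
      · exact hy a ha

theorem foldl_insertBy_pairwise {α : Type} (before : α → α → Bool)
    (hasym : ∀ a b, before a b = true → before b a = false)
    (htrans : ∀ a b c, before a b = true → before b c = true → before a c = true) :
    ∀ (xs acc : List α), acc.Pairwise (fun a b => before b a = false) →
      (xs.foldl (fun acc x => PySem.List.insertBy before x acc) acc).Pairwise
        (fun a b => before b a = false) := by
  intro xs
  induction xs with
  | nil => intro acc h; exact h
  | cons x xs ih =>
    intro acc h
    exact ih _ (insertBy_pairwise before hasym htrans x acc h)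

theorem sorted2_weight_pairwise (jewels : List (Int × Int)) :
    (PySem.List.sorted2 jewels (fun j => j.1) (fun j => j.2) false).Pairwise
      (fun a b => a.1 ≤ b.1) := by
  have h := foldl_insertBy_pairwise
    (fun (a b : Int × Int) => decide (a.1 < b.1) || (!decide (b.1 < a.1) && decide (a.2 < b.2)))
    (by intro a b hab; simp only [Bool.or_eq_true, Bool.and_eq_true, Bool.not_eq_true',
          decide_eq_true_eq, decide_eq_false_iff_not, Bool.or_eq_false_iff,
          Bool.and_eq_false_iff, Bool.not_eq_false'] at *; omega)
    (by intro a b c hab hbc; simp only [Bool.or_eq_true, Bool.and_eq_true, Bool.not_eq_true',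
          decide_eq_true_eq, decide_eq_false_iff_not] at *; omega)
    jewels [] (List.Pairwise.nil)
  have e : PySem.List.sorted2 jewels (fun j => j.1) (fun j => j.2) false
      = jewels.foldl (fun acc x => PySem.List.insertBy
          (fun (a b : Int × Int) => decide (a.1 < b.1) || (!decide (b.1 < a.1) && decide (a.2 < b.2)))
          x acc) [] := rfl
  rw [e]
  refine h.imp ?_
  intro a b hab
  simp only [Bool.or_eq_false_iff, Bool.and_eq_false_iff, Bool.not_eq_false',
    decide_eq_false_iff_not, decide_eq_true_eq] at hab
  rcases hab with ⟨h1, _⟩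
  omega

theorem foldl_min_le (l : List Int) (a : Int) :
    l.foldl min a ≤ a ∧ ∀ x ∈ l, l.foldl min a ≤ x := by
  induction l generalizing a with
  | nil => simp
  | cons b tl ih =>
    rcases ih (min a b) with ⟨h1, h2⟩
    refine ⟨le_trans h1 (min_le_left _ _), ?_⟩
    intro x hx
    rcases List.mem_cons.mp hx with rfl | hx
    · exact le_trans h1 (min_le_right _ _)
    · exact h2 x hx

theorem main_sim (J : List (Int × Int)) (HJw : J.Pairwise (fun a b => a.1 ≤ b.1)) :
    ∀ (bs : List Int) (c₀ : Int) (heap : List Int) (k : Nat) (s : Int) (rem : List (Int × Int)),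
      bs.Pairwise (· ≤ ·) → (∀ c ∈ bs, c₀ ≤ c) →
      heapInv heap →
      (heap : Multiset Int)
        = ((rem.filter (fun j => decide (j.1 ≤ c₀))).map (fun j => -j.2) : Multiset Int) →
      (rem.filter (fun j => !decide (j.1 ≤ c₀))).Perm (J.drop k) →
      rem.Pairwise (fun a b => b.2 ≤ a.2) →
      k ≤ J.length →
      (bs.foldl (bagStep J) (heap, k, s)).2.2 = (bs.foldl altStep (rem, s)).2 := by
  intro bs
  induction bs with
  | nil =>
    intro c₀ heap k s rem _ _ _ _ _ _ _
    rfl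
  | cons cbag bs ih =>
    intro c₀ heap k s rem hbs hbound hI hA hB hrem hk
    have hc₀c : c₀ ≤ cbag := hbound cbag List.mem_cons_self
    rcases List.pairwise_cons.mp hbs with ⟨hble, hbs'⟩
    rw [List.foldl_cons, List.foldl_cons]
    obtain ⟨a1, a2, a3, a4, a5⟩ := pushAll_spec J cbag (J.length - k) k heap rfl hk hI
    set heap₁ := (pushAll J cbag k heap).1 with hh1
    set k₁ := (pushAll J cbag k heap).2 with hk1
    have hdrop_pw : (J.drop k).Pairwise (fun a b => a.1 ≤ b.1) :=
      List.Pairwise.sublist (List.drop_sublist k J) HJw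
    obtain ⟨htw, hdw⟩ := tw_filter cbag (J.drop k) hdrop_pw
    rw [htw] at a4
    rw [hdw] at a5
    have hpermfit : (((J.drop k).filter (fun j => decide (j.1 ≤ cbag))) : List (Int × Int)).Perm
        ((rem.filter (fun j => !decide (j.1 ≤ c₀))).filter (fun j => decide (j.1 ≤ cbag))) :=
      (hB.filter _).symm
    have hsplit := ms_filter_split (fun j : Int × Int => decide (j.1 ≤ c₀))
      (fun j : Int × Int => decide (j.1 ≤ cbag))
      (by intro a ha; simp only [decide_eq_true_eq] at *; omega) rem
    have hA₁ : (heap₁ : Multiset Int)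
        = ((rem.filter (fun j => decide (j.1 ≤ cbag))).map (fun j => -j.2) : Multiset Int) := by
      rw [a4, hA]
      simp only [← Multiset.map_coe]
      rw [Multiset.coe_eq_coe.mpr hpermfit, hsplit, Multiset.map_add]
    have hheavy : (rem.filter (fun j => !decide (j.1 ≤ cbag))).Perm (J.drop k₁) := by
      rw [a5]
      have e1 : rem.filter (fun j => !decide (j.1 ≤ cbag))
          = (rem.filter (fun j => !decide (j.1 ≤ c₀))).filter (fun j => !decide (j.1 ≤ cbag)) := by
        rw [List.filter_filter]
        apply List.filter_congr
        intro x _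
        by_cases hx : x.1 ≤ cbag
        · simp [hx]
        · have hx0 : ¬ x.1 ≤ c₀ := fun hh => hx (le_trans hh hc₀c)
          simp [hx, hx0]
      rw [e1]
      exact hB.filter _
    by_cases hemp : heap₁.isEmpty
    · have h0 : (heap₁ : Multiset Int) = 0 := by rw [List.isEmpty_iff.mp hemp]; rfl
      have hnil : rem.filter (fun j => decide (j.1 ≤ cbag)) = [] := by
        have := hA₁.symm.trans h0
        have hmapnil := (Multiset.coe_eq_zero _).mp this
        exact List.map_eq_nil_iff.mp hmapnil
      have hfnone : findFit rem cbag = none := by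
        rw [findFit_eq_none_iff]
        intro j hj
        intro hjc
        have : j ∈ rem.filter (fun j => decide (j.1 ≤ cbag)) :=
          List.mem_filter.mpr ⟨hj, by simpa using hjc⟩
        rw [hnil] at this
        simp at this
      have eA : bagStep J (heap, k, s) cbag = (heap₁, k₁, s) := by
        simp only [bagStep, ← hh1, ← hk1]
        rw [if_pos hemp]
      have eB : altStep (rem, s) cbag = (rem, s) := by
        simp [altStep, hfnone]
      rw [eA, eB]
      exact ih cbag heap₁ k₁ s rem hbs' hble a3 hA₁ hheavy hrem a2
    · have hne : heap₁ ≠ [] := fun hh => (by simp [hh] at hemp)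
      obtain ⟨p1, p2, p3⟩ := heappop_spec heap₁ hne a3
      cases hff : findFit rem cbag with
      | none =>
        exfalso
        have hall := (findFit_eq_none_iff rem cbag).mp hff
        have hnil : rem.filter (fun j => decide (j.1 ≤ cbag)) = [] := by
          rw [List.filter_eq_nil_iff]
          intro j hj
          simpa using hall j hj
        rw [hnil] at hA₁
        simp only [List.map_nil, Multiset.coe_nil] at hA₁
        exact hne ((Multiset.coe_eq_zero _).mp hA₁)
      | some pr =>
        obtain ⟨j, r'⟩ := pr
        obtain ⟨pre, post, hrem_eq, hr'_eq, hprefail, hjfit⟩ := findFit_eq_some rem cbag j r' hff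
        have hprefilP : pre.filter (fun j => decide (j.1 ≤ cbag)) = [] := by
          rw [List.filter_eq_nil_iff]
          intro y hy
          simpa using hprefail y hy
        have hfil : rem.filter (fun j => decide (j.1 ≤ cbag))
            = j :: post.filter (fun j => decide (j.1 ≤ cbag)) := by
          rw [hrem_eq, List.filter_append, hprefilP, List.filter_cons]
          simp [hjfit]
        have hfil' : r'.filter (fun j => decide (j.1 ≤ cbag))
            = post.filter (fun j => decide (j.1 ≤ cbag)) := by
          rw [hr'_eq, List.filter_append, hprefilP]
          simp
        have hmax : ∀ y ∈ rem, y.1 ≤ cbag → y.2 ≤ j.2 := by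
          intro y hy hyc
          rw [hrem_eq] at hy
          rcases List.mem_append.mp hy with hy | hy
          · exact absurd hyc (hprefail y hy)
          · rcases List.mem_cons.mp hy with rfl | hy
            · exact le_refl _
            · have hp2 := (List.pairwise_append.mp (hrem_eq ▸ hrem)).2.1
              exact (List.pairwise_cons.mp hp2).1 y hy
        have hjmem : -j.2 ∈ heap₁ := by
          have hjf : j ∈ rem.filter (fun j => decide (j.1 ≤ cbag)) := by
            rw [hfil]; exact List.mem_cons_self
          have : -j.2 ∈ (rem.filter (fun j => decide (j.1 ≤ cbag))).map (fun j => -j.2) :=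
            List.mem_map.mpr ⟨j, hjf, rfl⟩
          have hmem : -j.2 ∈ ((rem.filter (fun j => decide (j.1 ≤ cbag))).map
              (fun j => -j.2) : Multiset Int) := by simpa using this
          rw [← hA₁] at hmem
          simpa using hmem
        have hq1mem : (pyHeappop heap₁).1 ∈ heap₁ := by
          have : (pyHeappop heap₁).1 ∈ ((heap₁ : List Int) : Multiset Int) := by
            rw [← p1]; exact Multiset.mem_cons_self _ _
          simpa using this
        have hq1 : (pyHeappop heap₁).1 = -j.2 := by
          refine le_antisymm (p3 _ hjmem) ?_
          have hmem2 : (pyHeappop heap₁).1 ∈ ((rem.filter (fun j => decide (j.1 ≤ cbag))).map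
              (fun j => -j.2) : List Int) := by
            have : (pyHeappop heap₁).1 ∈ ((heap₁ : List Int) : Multiset Int) := by simpa using hq1mem
            rw [hA₁] at this
            simpa using this
          obtain ⟨y, hyf, hyeq⟩ := List.mem_map.mp hmem2
          rcases List.mem_filter.mp hyf with ⟨hyrem, hyc⟩
          have := hmax y hyrem (by simpa using hyc)
          omega
        have eA : bagStep J (heap, k, s) cbag
            = ((pyHeappop heap₁).2, k₁, s - (pyHeappop heap₁).1) := by
          simp only [bagStep, ← hh1, ← hk1]
          rw [if_neg hemp]
        have eB : altStep (rem, s) cbag = (r', s + j.2) := by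
          simp [altStep, hff]
        rw [eA, eB, hq1]
        have hsum : s - -j.2 = s + j.2 := by ring
        rw [hsum]
        have hA' : (((pyHeappop heap₁).2 : List Int) : Multiset Int)
            = ((r'.filter (fun j => decide (j.1 ≤ cbag))).map (fun j => -j.2) : Multiset Int) := by
          have hcons : (-j.2) ::ₘ (((pyHeappop heap₁).2 : List Int) : Multiset Int)
              = (-j.2) ::ₘ ((r'.filter (fun j => decide (j.1 ≤ cbag))).map (fun j => -j.2) : Multiset Int) := by
            rw [← hq1, p1, hA₁, hfil, hfil']
            simp [← Multiset.cons_coe, hq1]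
          exact (Multiset.cons_inj_right _).mp hcons
        have hB' : (r'.filter (fun j => !decide (j.1 ≤ cbag))).Perm (J.drop k₁) := by
          have e2 : r'.filter (fun j => !decide (j.1 ≤ cbag))
              = rem.filter (fun j => !decide (j.1 ≤ cbag)) := by
            rw [hr'_eq, hrem_eq, List.filter_append, List.filter_append, List.filter_cons]
            simp [hjfit]
          rw [e2]
          exact hheavy
        have hrem' : r'.Pairwise (fun a b => b.2 ≤ a.2) := by
          rw [hr'_eq]
          exact List.Pairwise.sublist ((List.sublist_cons_self j post).append_left pre)
            (hrem_eq ▸ hrem)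
        exact ih cbag (pyHeappop heap₁).2 k₁ (s + j.2) r' hbs' hble p2 hA' hB' hrem' a2

-- ===== VERDICT (by name: the statement is the Claim_ definition above) =====
theorem solution_spec : Claim_equal_solution := by
  intro jewels bag_capacities _
  show solution jewels bag_capacities = solution_alt jewels bag_capacities
  show (((PySem.List.sorted bag_capacities (fun x => x) false).foldl
      (bagStep (PySem.List.sorted2 jewels (fun j => j.1) (fun j => j.2) false)) ([], 0, 0)).2.2)
    = (((PySem.List.sorted bag_capacities (fun x => x) false).foldl altStep
      ((PySem.List.sorted (PySem.List.sorted2 jewels (fun j => j.1) (fun j => j.2) false)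
        (fun j => -j.2) false), 0)).2)
  set js := PySem.List.sorted2 jewels (fun j => j.1) (fun j => j.2) false with hjs
  set bs := PySem.List.sorted bag_capacities (fun x => x) false with hbsdef
  set rem := PySem.List.sorted js (fun j => -j.2) false with hremdef
  have HJw : js.Pairwise (fun a b => a.1 ≤ b.1) := sorted2_weight_pairwise jewels
  have hbs : bs.Pairwise (· ≤ ·) := PySem.List.sorted_pairwise bag_capacities (fun x => x)
  have hrem : rem.Pairwise (fun a b => b.2 ≤ a.2) := by
    have := PySem.List.sorted_pairwise js (fun j => -j.2)
    exact this.imp (by intro a b hab; omega)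
  have hperm : rem.Perm js := PySem.List.sorted_perm js (fun j => -j.2) false
  set c₀ := ((rem.map (fun j => j.1) ++ bs).foldl min 0) - 1 with hc₀def
  obtain ⟨hm1, hm2⟩ := foldl_min_le (rem.map (fun j => j.1) ++ bs) 0
  have hbound : ∀ c ∈ bs, c₀ ≤ c := by
    intro c hc
    have := hm2 c (List.mem_append_right _ hc)
    omega
  have hfail : ∀ j ∈ rem, ¬ j.1 ≤ c₀ := by
    intro j hj
    have := hm2 j.1 (List.mem_append_left _ (List.mem_map_of_mem hj))
    omega
  have hfilnil : rem.filter (fun j => decide (j.1 ≤ c₀)) = [] := by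
    rw [List.filter_eq_nil_iff]
    intro j hj
    simpa using hfail j hj
  have hfilself : rem.filter (fun j => !decide (j.1 ≤ c₀)) = rem := by
    rw [List.filter_eq_self]
    intro j hj
    simpa using hfail j hj
  have hA0 : (([] : List Int) : Multiset Int)
      = ((rem.filter (fun j => decide (j.1 ≤ c₀))).map (fun j => -j.2) : Multiset Int) := by
    rw [hfilnil]; rfl
  have hB0 : (rem.filter (fun j => !decide (j.1 ≤ c₀))).Perm (js.drop 0) := by
    rw [hfilself, List.drop_zero]
    exact hperm
  have hI0 : heapInv [] := by
    intro j hj hjl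
    simp at hjl
  exact main_sim js HJw bs c₀ [] 0 0 rem hbs hbound hI0 hA0 hB0 hrem (by simp)
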